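-- pv_equiv track=rewrite | github.com/Lokeshvastrad/Python_Random | Python/Python/revision_maxPriceKeyboard.py | maxPriceKeyBoard
-- ===== SOURCE A (Python) =====
-- def maxPriceKeyBoard(a,b,budget):
--     maxPrice=-1
--     n=len(a)
--     m=len(b)
--     for i in range(n):
--         for j in range(m):
--             if a[i]+b[j] <= budget:
--                 maxPrice=max(maxPrice,(a[i]+b[j]))
--     return maxPrice
-- ===== SOURCE B (Python) =====
-- def _bisect_right(s, t, lo, hi):
--     # index of first element of s[lo:hi] that is > t (s sorted ascending)
--     while lo < hi:
--         mid = (lo + hi) // 2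
--         if s[mid] <= t:
--             lo = mid + 1
--         else:
--             hi = mid
--     return lo
--
-- def maxPriceKeyBoard(a, b, budget):
--     s = sorted(b)
--     best = -1
--     for x in a:
--         k = _bisect_right(s, budget - x, 0, len(s))
--         if k > 0:
--             best = max(best, x + s[k - 1])
--     return best
-- ===== Notes on version B (the rewrite author's own statement) =====
-- stated objective: faster
-- what changed: Replaces the brute-force scan of all n*m pairs by sorting b once and binary-searching, for each a[i], the largest b element not exceeding budget-a[i].
import Mathlib
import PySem

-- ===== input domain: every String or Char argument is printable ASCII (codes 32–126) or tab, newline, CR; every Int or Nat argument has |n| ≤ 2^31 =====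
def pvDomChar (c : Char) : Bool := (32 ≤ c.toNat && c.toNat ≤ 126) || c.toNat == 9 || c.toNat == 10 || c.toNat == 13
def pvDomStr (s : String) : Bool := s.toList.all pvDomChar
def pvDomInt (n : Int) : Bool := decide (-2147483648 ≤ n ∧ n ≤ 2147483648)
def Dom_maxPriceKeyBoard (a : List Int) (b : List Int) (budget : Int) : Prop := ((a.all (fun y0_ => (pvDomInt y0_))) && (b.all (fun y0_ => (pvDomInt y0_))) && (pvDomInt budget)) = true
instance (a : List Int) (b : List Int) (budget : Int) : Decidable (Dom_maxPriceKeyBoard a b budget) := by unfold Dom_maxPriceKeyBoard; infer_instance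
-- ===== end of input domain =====

-- B sorts b once and binary-searches budget-a[i] for each a[i] instead of scanning all pairs (objective: faster).

-- ===== PORT A =====
-- literal port of A: nested index loops over range(n) × range(m), accumulator maxPrice starting at -1
def maxPriceKeyBoard (a : List Int) (b : List Int) (budget : Int) : Int :=
  (PySem.List.pyRange 0 (a.length : Int) 1).foldl (fun maxPrice i =>
    (PySem.List.pyRange 0 (b.length : Int) 1).foldl (fun maxPrice j =>
      if PySem.List.pyGetD a i 0 + PySem.List.pyGetD b j 0 ≤ budget then
        max maxPrice (PySem.List.pyGetD a i 0 + PySem.List.pyGetD b j 0)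
      else maxPrice) maxPrice) (-1)

-- ===== PORT B =====
-- port of Source B's hand-written binary search `_bisect_right` (while lo < hi …); s[mid] is always
-- in range on the calls B makes (lo < hi ≤ len s), so List.getD is exact there
def bisectRightAux (s : List Int) (t : Int) (lo hi : Nat) : Nat :=
  if lo < hi then
    let mid := (lo + hi) / 2
    if s.getD mid 0 ≤ t then bisectRightAux s t (mid + 1) hi
    else bisectRightAux s t lo mid
  else lo
termination_by hi - lo
decreasing_by all_goals omega

-- literal port of Source B's maxPriceKeyBoard: sort b, fold over a with binary search
def maxPriceKeyBoard_alt (a : List Int) (b : List Int) (budget : Int) : Int :=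
  let s := PySem.List.sorted b (fun y => y) false
  a.foldl (fun best x =>
    let k := bisectRightAux s (budget - x) 0 s.length
    if k > 0 then max best (x + s.getD (k - 1) 0) else best) (-1)

-- ===== PRECONDITION & SPEC =====
def Spec_maxPriceKeyBoard (a : List Int) (b : List Int) (budget : Int) (out : Int) : Prop := out = maxPriceKeyBoard_alt a b budget
instance (a : List Int) (b : List Int) (budget : Int) (out : Int) : Decidable (Spec_maxPriceKeyBoard a b budget out) := by unfold Spec_maxPriceKeyBoard; infer_instance

-- ===== CLAIM (what is proved, stated in full; the proofs are below) =====
def Claim_equal_maxPriceKeyBoard : Prop := ∀ (a : List Int) (b : List Int) (budget : Int), Dom_maxPriceKeyBoard a b budget → Spec_maxPriceKeyBoard a b budget (maxPriceKeyBoard a b budget)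

-- ===== LEMMAS AND PROOFS =====

-- invariant of the binary search: on a sorted list it returns a split point k with
-- s[j] ≤ t for j < k and t < s[j] for j ≥ k
theorem bisectRightAux_inv (s : List Int) (hs : s.Pairwise (· ≤ ·)) (t : Int) :
    ∀ lo hi, hi ≤ s.length →
      (∀ j (hj : j < s.length), j < lo → s[j] ≤ t) →
      (∀ j (hj : j < s.length), hi ≤ j → t < s[j]) →
      lo ≤ hi →
      (bisectRightAux s t lo hi ≤ s.length ∧
        (∀ j (hj : j < s.length), j < bisectRightAux s t lo hi → s[j] ≤ t) ∧
        (∀ j (hj : j < s.length), bisectRightAux s t lo hi ≤ j → t < s[j])) := by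
  intro lo hi
  induction lo, hi using bisectRightAux.induct s t with
  | case1 lo hi hlt mid hmid ih =>
    intro hhi hlo' hhi' hle
    rw [bisectRightAux, if_pos hlt, if_pos (by simpa [mid] using hmid)]
    refine ih hhi ?_ hhi' (by omega)
    intro j hj hjlt
    rcases Nat.lt_or_ge j lo with h | h
    · exact hlo' j hj h
    · -- lo ≤ j ≤ mid < hi ≤ len: s[j] ≤ s[mid] ≤ t by sortedness
      have hml : mid < s.length := by omega
      have hjm : s[j] ≤ s[mid] := by
        rcases Nat.lt_or_ge j mid with h2 | h2
        · exact (List.pairwise_iff_getElem.mp hs) j mid hj hml h2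
        · have : j = mid := by omega
          simp [this]
      have : s[mid] ≤ t := by
        have := hmid; rwa [List.getD_eq_getElem s 0 hml] at this
      omega
  | case2 lo hi hlt mid hmid ih =>
    intro hhi hlo' hhi' hle
    rw [bisectRightAux, if_pos hlt, if_neg (by simpa [mid] using hmid)]
    refine ih (by omega) hlo' ?_ (by omega)
    intro j hj hjge
    rcases Nat.lt_or_ge j hi with h | h
    · -- mid ≤ j < hi: t < s[mid] ≤ s[j]
      have hml : mid < s.length := by omega
      have hmj : s[mid] ≤ s[j] := by
        rcases Nat.lt_or_ge mid j with h2 | h2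
        · exact (List.pairwise_iff_getElem.mp hs) mid j hml hj h2
        · have : mid = j := by omega
          simp [this]
      have : t < s[mid] := by
        have := hmid; rw [List.getD_eq_getElem s 0 hml] at this; omega
      omega
    · exact hhi' j hj h
  | case3 lo hi hnlt =>
    intro hhi hlo' hhi' hle
    rw [bisectRightAux, if_neg hnlt]
    exact ⟨by omega, fun j hj hjlt => hlo' j hj hjlt, fun j hj hjge => hhi' j hj (by omega)⟩

-- a fold of the guarded-max step over a list whose elements all fail the guard is the identity
theorem foldl_none (budget x : Int) (l : List Int) (h : ∀ y ∈ l, ¬ (x + y ≤ budget)) (mp : Int) :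
    l.foldl (fun m y => if x + y ≤ budget then max m (x + y) else m) mp = mp := by
  induction l generalizing mp with
  | nil => rfl
  | cons y l ih =>
    simp only [List.foldl_cons, if_neg (h y (by simp))]
    exact ih (fun z hz => h z (by simp [hz])) mp

-- a fold of the guarded-max step over a sorted list whose elements all pass the guard
-- is max with x + last element
theorem foldl_all (budget x : Int) (l : List Int) (hs : l.Pairwise (· ≤ ·))
    (h : ∀ y ∈ l, x + y ≤ budget) (hne : l ≠ []) (mp : Int) :
    l.foldl (fun m y => if x + y ≤ budget then max m (x + y) else m) mp
      = max mp (x + l.getLast hne) := by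
  induction l generalizing mp with
  | nil => exact absurd rfl hne
  | cons y l ih =>
    simp only [List.foldl_cons, if_pos (h y (by simp))]
    rcases eq_or_ne l [] with hl | hl
    · subst hl; simp
    · rw [ih (hs.of_cons) (fun z hz => h z (by simp [hz])) hl]
      have hyl : y ≤ l.getLast hl := by
        have := List.pairwise_cons.mp hs |>.1
        exact this _ (List.getLast_mem hl)
      rw [List.getLast_cons hl]
      omega

-- the inner brute-force fold over a sorted list equals B's binary-search step
theorem inner_eq (budget x : Int) (s : List Int) (hs : s.Pairwise (· ≤ ·)) (mp : Int) :
    s.foldl (fun m y => if x + y ≤ budget then max m (x + y) else m) mp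
      = (let k := bisectRightAux s (budget - x) 0 s.length
         if k > 0 then max mp (x + s.getD (k - 1) 0) else mp) := by
  obtain ⟨hk1, hk2, hk3⟩ := bisectRightAux_inv s hs (budget - x) 0 s.length le_rfl
    (by omega) (by intro j hj hle; omega) (Nat.zero_le _)
  set k := bisectRightAux s (budget - x) 0 s.length with hkdef
  have hsplit : s = s.take k ++ s.drop k := (List.take_append_drop k s).symm
  conv_lhs => rw [hsplit]
  rw [List.foldl_append]
  have hdrop : (s.drop k).foldl (fun m y => if x + y ≤ budget then max m (x + y) else m)
      ((s.take k).foldl (fun m y => if x + y ≤ budget then max m (x + y) else m) mp)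
      = (s.take k).foldl (fun m y => if x + y ≤ budget then max m (x + y) else m) mp := by
    apply foldl_none
    intro y hy
    obtain ⟨j, hj, hyj⟩ := List.getElem_of_mem hy
    rw [List.getElem_drop] at hyj
    have hlen : k + j < s.length := by
      have := (List.length_drop (l := s) (i := k)) ▸ hj; omega
    have := hk3 (k + j) hlen (by omega)
    omega
  rw [hdrop]
  by_cases hk0 : 0 < k
  · have hklen : k ≤ s.length := hk1
    have htlen : (s.take k).length = k := by simp; omega
    have hne : s.take k ≠ [] := by
      intro h; rw [h] at htlen; simp at htlen; omega
    rw [foldl_all budget x _ (List.Pairwise.sublist (List.take_sublist _ _) hs)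
      (by
        intro y hy
        obtain ⟨j, hj, hyj⟩ := List.getElem_of_mem hy
        rw [List.getElem_take] at hyj
        have hjk : j < k := by omega
        have hjl : j < s.length := by omega
        have := hk2 j hjl hjk
        omega) hne mp]
    rw [List.getLast_eq_getElem, if_pos hk0]
    have hidx : (s.take k).length - 1 < s.length := by omega
    have : (s.take k)[(s.take k).length - 1] = s[(s.take k).length - 1] := List.getElem_take
    rw [this]
    congr 1
    rw [List.getD_eq_getElem s 0 (by omega)]
    congr 2
    omega
  · rw [if_neg hk0]
    have : s.take k = [] := by
      have : k = 0 := by omega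
      simp [this]
    rw [this]; rfl

-- A's nested index loops, rewritten as element folds
theorem portA_foldl (a b : List Int) (budget : Int) :
    maxPriceKeyBoard a b budget
      = a.foldl (fun mp x =>
          b.foldl (fun m y => if x + y ≤ budget then max m (x + y) else m) mp) (-1) := by
  unfold maxPriceKeyBoard
  rw [PySem.List.foldl_pyRange_zero_pyGetD' a 0
    (fun mp x => (PySem.List.pyRange 0 (b.length : Int) 1).foldl
      (fun m j => if x + PySem.List.pyGetD b j 0 ≤ budget then max m (x + PySem.List.pyGetD b j 0) else m) mp) (-1)]
  congr 1
  funext mp x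
  exact PySem.List.foldl_pyRange_zero_pyGetD' b 0
    (fun m y => if x + y ≤ budget then max m (x + y) else m) mp

-- ===== VERDICT (by name: the statement is the Claim_ definition above) =====
theorem maxPriceKeyBoard_spec : Claim_equal_maxPriceKeyBoard := by
  intro a b budget _
  unfold Spec_maxPriceKeyBoard
  rw [portA_foldl]
  unfold maxPriceKeyBoard_alt
  set s := PySem.List.sorted b (fun y => y) false with hsdef
  have hperm : b.Perm s := (PySem.List.sorted_perm b (fun y => y) false).symm
  have hpw : s.Pairwise (· ≤ ·) := PySem.List.sorted_pairwise b (fun y => y)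
  congr 1
  funext mp x
  have hcomm : ∀ (m : Int) (y1 y2 : Int),
      (fun m y => if x + y ≤ budget then max m (x + y) else m)
        ((fun m y => if x + y ≤ budget then max m (x + y) else m) m y1) y2
      = (fun m y => if x + y ≤ budget then max m (x + y) else m)
        ((fun m y => if x + y ≤ budget then max m (x + y) else m) m y2) y1 := by
    intro m y1 y2; simp only; split_ifs <;> omega
  rw [@List.Perm.foldl_eq _ _ _ _ _ ⟨hcomm⟩ hperm mp]
  exact inner_eq budget x s hpw mp
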